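-- pv_equiv track=rewrite | github.com/richard-eipi/UofT-CSC111-Project | data_computations.py | get_id_num
-- ===== SOURCE A (Python) =====
-- def get_id_num(url: str) -> str:
--     """Find the id number of the game from the given url.
--
--     Preconditions:
--         - the url must contain the id.
--     """
--     id_num, digit = '', False
--     for i in range(0, len(url)):
--         if url[i].isdigit():
--             digit = True
--             id_num += url[i]
--         elif url[i] == '/' and digit is True:
--             break
--
--     return id_num
-- ===== SOURCE B (Python) =====
-- def get_id_num(url: str) -> str:
--     """Find the id number of the game from the given url."""
--     start = next((i for i, c in enumerate(url) if c.isdigit()), None)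
--     if start is None:
--         return ''
--     segment = ''
--     for c in url[start:]:
--         if c == '/':
--             break
--         segment += c
--     return ''.join(c for c in segment if c.isdigit())
-- ===== Notes on version B (the rewrite author's own statement) =====
-- stated objective: simpler
-- what changed: Replaced the single stateful flag-and-break loop with a three-phase decomposition: locate the first digit index, truncate at the first slash after it, then filter the digits.
import Mathlib
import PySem

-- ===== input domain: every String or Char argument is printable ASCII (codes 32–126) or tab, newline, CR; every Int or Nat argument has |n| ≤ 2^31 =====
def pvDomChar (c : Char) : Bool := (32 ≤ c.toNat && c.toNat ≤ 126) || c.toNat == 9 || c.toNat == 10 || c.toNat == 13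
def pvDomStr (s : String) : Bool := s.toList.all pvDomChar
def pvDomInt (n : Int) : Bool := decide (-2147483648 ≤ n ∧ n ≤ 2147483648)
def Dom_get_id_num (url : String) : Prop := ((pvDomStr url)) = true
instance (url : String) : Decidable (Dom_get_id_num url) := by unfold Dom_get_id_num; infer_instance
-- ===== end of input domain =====

-- B replaces A's single stateful flag-and-break loop by a three-phase decomposition
-- (locate first digit, truncate at the first slash after it, filter digits); objective: simpler.


-- ===== PORT A =====
-- A's 'for i in range(len(url))' loop, carrying the (id_num, digit) state; break returns acc.
def pvLoopA : List Char → Bool → List Char → List Char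
  | [], _, acc => acc
  | c :: cs, digit, acc =>
    if PySem.Str.isdigit c then pvLoopA cs true (acc ++ [c])
    else if c = '/' ∧ digit = true then acc
    else pvLoopA cs digit acc

def get_id_num (url : String) : String :=
  String.ofList (pvLoopA url.toList false [])

-- ===== PORT B =====
-- next((i for i, c in enumerate(url) if c.isdigit()), None)
def pvFirstDigitIdx : List Char → Option Nat
  | [] => none
  | c :: cs => if PySem.Str.isdigit c then some 0 else (pvFirstDigitIdx cs).map (· + 1)

-- the 'for c in url[start:]: if c == '/': break; segment += c' loop
def pvBeforeSlash : List Char → List Char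
  | [] => []
  | c :: cs => if c = '/' then [] else c :: pvBeforeSlash cs

def get_id_num_alt (url : String) : String :=
  match pvFirstDigitIdx url.toList with
  | none => ""
  | some start =>
      String.ofList ((pvBeforeSlash (url.toList.drop start)).filter (fun c => PySem.Str.isdigit c))

-- ===== PRECONDITION & SPEC =====
def Spec_get_id_num (url : String) (out : String) : Prop := out = get_id_num_alt url
instance (url : String) (out : String) : Decidable (Spec_get_id_num url out) := by unfold Spec_get_id_num; infer_instance

-- ===== CLAIM (what is proved, stated in full; the proofs are below) =====
def Claim_equal_get_id_num : Prop := ∀ (url : String), Dom_get_id_num url → Spec_get_id_num url (get_id_num url)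

-- ===== LEMMAS AND PROOFS =====

theorem pvLoopA_true (cs : List Char) (acc : List Char) :
    pvLoopA cs true acc = acc ++ (pvBeforeSlash cs).filter (fun c => PySem.Str.isdigit c) := by
  induction cs generalizing acc with
  | nil => simp [pvLoopA, pvBeforeSlash]
  | cons c cs ih =>
    by_cases hd : PySem.Str.isdigit c
    · have hne : ¬ c = '/' := by
        intro h; subst h; exact absurd hd (by decide)
      simp [pvLoopA, pvBeforeSlash, hd, hne, ih]
    · by_cases hs : c = '/'
      · simp [pvLoopA, pvBeforeSlash, hs, (by decide : PySem.Str.isdigit '/' = false)]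
      · simp [pvLoopA, pvBeforeSlash, hd, hs, ih]

theorem pvLoopA_eq (cs : List Char) :
    pvLoopA cs false [] =
      (match pvFirstDigitIdx cs with
       | none => []
       | some i => (pvBeforeSlash (cs.drop i)).filter (fun c => PySem.Str.isdigit c)) := by
  induction cs with
  | nil => simp [pvLoopA, pvFirstDigitIdx]
  | cons c cs ih =>
    by_cases hd : PySem.Str.isdigit c
    · have hne : ¬ c = '/' := by
        intro h; subst h; exact absurd hd (by decide)
      simp [pvLoopA, pvFirstDigitIdx, hd, hne, pvBeforeSlash, pvLoopA_true]
    · have h1 : pvLoopA (c :: cs) false [] = pvLoopA cs false [] := by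
        simp [pvLoopA, hd]
      rw [h1, ih]
      cases h : pvFirstDigitIdx cs with
      | none => simp [pvFirstDigitIdx, hd, h]
      | some i => simp [pvFirstDigitIdx, hd, h]

-- ===== VERDICT (by name: the statement is the Claim_ definition above) =====
theorem get_id_num_spec : Claim_equal_get_id_num := by
  intro url _
  unfold Spec_get_id_num get_id_num get_id_num_alt
  rw [pvLoopA_eq]
  cases h : pvFirstDigitIdx url.toList with
  | none => rfl
  | some i => rfl
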